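-- pv_equiv track=rewrite | github.com/huynhtuandat05december/master-thesis-pipeline | post_processing/process_inline_completion.py | get_matching_suffix_length
-- ===== SOURCE A (Python) =====
-- def get_matching_suffix_length(insert_text, current_line_suffix):
--     j = 0
--     for i in range(len(insert_text)):
--         if j >= len(current_line_suffix):
--             return j
--         if insert_text[i] == current_line_suffix[j]:
--             j += 1
--     return j
-- ===== SOURCE B (Python) =====
-- def get_matching_suffix_length(insert_text, current_line_suffix):
--     # Binary search for the largest k such that current_line_suffix[:k] is a
--     # subsequence of insert_text; that k equals A's greedy match count, since
--     # "prefix of length k is a subsequence" is monotone in k and greedy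
--     # subsequence matching is optimal.
--     def is_subsequence(pattern):
--         it = iter(insert_text)
--         return all(ch in it for ch in pattern)
--
--     lo, hi = 0, len(current_line_suffix)
--     while lo < hi:
--         mid = (lo + hi + 1) // 2
--         if is_subsequence(current_line_suffix[:mid]):
--             lo = mid
--         else:
--             hi = mid - 1
--     return lo
-- ===== Notes on version B (the rewrite author's own statement) =====
-- stated objective: alternative
-- what changed: Replaces the single greedy two-pointer scan by a binary search on the answer length k with a subsequence feasibility test of suffix[:k] against the text (correct because the greedy match count is the largest k whose prefix is a subsequence, a monotone predicate).
import Mathlib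
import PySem

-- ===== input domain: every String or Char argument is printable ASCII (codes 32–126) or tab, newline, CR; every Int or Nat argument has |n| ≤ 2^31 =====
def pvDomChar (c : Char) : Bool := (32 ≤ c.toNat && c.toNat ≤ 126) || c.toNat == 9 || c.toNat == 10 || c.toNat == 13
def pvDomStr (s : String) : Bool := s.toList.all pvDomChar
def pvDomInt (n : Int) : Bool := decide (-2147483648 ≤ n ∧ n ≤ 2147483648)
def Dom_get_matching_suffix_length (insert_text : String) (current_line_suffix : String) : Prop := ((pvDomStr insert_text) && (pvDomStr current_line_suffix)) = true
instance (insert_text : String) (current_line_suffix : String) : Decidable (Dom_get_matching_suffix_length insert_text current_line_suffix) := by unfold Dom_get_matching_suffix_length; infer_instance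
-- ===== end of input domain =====

-- B replaces the greedy two-pointer scan by a binary search on the answer length k,
-- testing whether suffix[:k] is a subsequence of the text; same value, different algorithm.

-- ===== PORT A =====
-- A's for-loop over range(len(insert_text)) with state j, as structural recursion over the text's characters.
def pvALoop (text : List Char) (suffix : List Char) (j : Int) : Int :=
  match text with
  | [] => j
  | c :: rest =>
    if j ≥ (suffix.length : Int) then j
    else if some c = PySem.List.pyGet? suffix j then pvALoop rest suffix (j + 1)
    else pvALoop rest suffix j

def get_matching_suffix_length (insert_text : String) (current_line_suffix : String) : Int :=
  pvALoop insert_text.toList current_line_suffix.toList 0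

-- ===== PORT B =====
-- 'ch in it' on the shared iterator: consume the iterator up to and including the first match.
def pvScan (it : List Char) (c : Char) : Option (List Char) :=
  match it with
  | [] => none
  | t :: rest => if t = c then some rest else pvScan rest c

-- is_subsequence: all(ch in it for ch in pattern) over a fresh iterator of a fixed text.
def pvIsSub (pat : List Char) (txt : List Char) : Bool :=
  match pat with
  | [] => true
  | c :: cs =>
    match pvScan txt c with
    | some rest => pvIsSub cs rest
    | none => false

-- the while lo < hi binary-search loop; lo, hi are nonnegative Python ints, '//' on them = Nat./.
-- current_line_suffix[:mid] with 0 ≤ mid = List.take mid.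
def pvBSearch (txt suf : List Char) (lo hi : Nat) : Nat :=
  if lo < hi then
    let mid := (lo + hi + 1) / 2
    if pvIsSub (suf.take mid) txt then pvBSearch txt suf mid hi
    else pvBSearch txt suf lo (mid - 1)
  else lo
termination_by hi - lo
decreasing_by all_goals omega

def get_matching_suffix_length_alt (insert_text : String) (current_line_suffix : String) : Int :=
  (pvBSearch insert_text.toList current_line_suffix.toList 0 current_line_suffix.toList.length : Int)

-- ===== PRECONDITION & SPEC =====
def Spec_get_matching_suffix_length (insert_text : String) (current_line_suffix : String) (out : Int) : Prop := out = get_matching_suffix_length_alt insert_text current_line_suffix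
instance (insert_text : String) (current_line_suffix : String) (out : Int) : Decidable (Spec_get_matching_suffix_length insert_text current_line_suffix out) := by unfold Spec_get_matching_suffix_length; infer_instance

-- ===== CLAIM (what is proved, stated in full; the proofs are below) =====
def Claim_equal_get_matching_suffix_length : Prop := ∀ (insert_text : String) (current_line_suffix : String), Dom_get_matching_suffix_length insert_text current_line_suffix → Spec_get_matching_suffix_length insert_text current_line_suffix (get_matching_suffix_length insert_text current_line_suffix)

-- ===== LEMMAS AND PROOFS =====

-- the greedy match count, in Nat, recursing on the text (proof-side reference value)
def pvGreedy (txt : List Char) (pat : List Char) : Nat :=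
  match txt, pat with
  | [], _ => 0
  | _ :: _, [] => 0
  | t :: ts, p :: ps => if t = p then 1 + pvGreedy ts ps else pvGreedy ts (p :: ps)

lemma pvALoop_eq_greedy (text suffix : List Char) (j : Nat) (hj : j ≤ suffix.length) :
    pvALoop text suffix (j : Int) = (j : Int) + (pvGreedy text (suffix.drop j) : Int) := by
  induction text generalizing j with
  | nil => simp [pvALoop, pvGreedy]
  | cons c rest ih =>
    by_cases hge : j ≥ suffix.length
    · have hj' : j = suffix.length := le_antisymm hj hge
      simp [pvALoop, hj', pvGreedy]
    · rw [not_le] at hge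
      have hdrop : suffix.drop j = suffix[j] :: suffix.drop (j + 1) :=
        List.drop_eq_getElem_cons hge
      have hget : PySem.List.pyGet? suffix (j : Int) = some suffix[j] := by simp [hge]
      have hlt : ¬ ((j : Int) ≥ (suffix.length : Int)) := by exact_mod_cast not_le.mpr hge
      show (if (j : Int) ≥ (suffix.length : Int) then (j : Int)
            else if some c = PySem.List.pyGet? suffix (j : Int) then pvALoop rest suffix ((j : Int) + 1)
            else pvALoop rest suffix (j : Int))
          = (j : Int) + (pvGreedy (c :: rest) (suffix.drop j) : Int)
      rw [if_neg hlt, hget, hdrop]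
      by_cases hc : c = suffix[j]
      · have h1 := ih (j + 1) (by omega)
        push_cast at h1 ⊢
        simp [pvGreedy, hc, h1]; ring
      · have h1 := ih j hj
        rw [hdrop] at h1
        rw [if_neg (show ¬ (some c = some suffix[j]) by simp [hc]), h1]
        simp [pvGreedy, hc]

lemma pvGreedy_cons_scan (txt : List Char) (c : Char) (ps : List Char) :
    pvGreedy txt (c :: ps) =
      match pvScan txt c with
      | some rest => 1 + pvGreedy rest ps
      | none => 0 := by
  induction txt with
  | nil => simp [pvGreedy, pvScan]
  | cons t ts ih =>
    by_cases h : t = c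
    · simp [pvGreedy, pvScan, h]
    · simp [pvGreedy, pvScan, h, ih]

lemma pvGreedy_le (txt pat : List Char) : pvGreedy txt pat ≤ pat.length := by
  induction txt generalizing pat with
  | nil => simp [pvGreedy]
  | cons t ts ih =>
    cases pat with
    | nil => simp [pvGreedy]
    | cons p ps =>
      by_cases h : t = p
      · have := ih ps; simp [pvGreedy, h]; omega
      · have := ih (p :: ps); simp [pvGreedy, h]; simpa using this

lemma pvIsSub_iff (pat txt : List Char) :
    pvIsSub pat txt = true ↔ pat.length ≤ pvGreedy txt pat := by
  induction pat generalizing txt with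
  | nil => simp [pvIsSub]
  | cons c cs ih =>
    rw [pvGreedy_cons_scan]
    cases h : pvScan txt c with
    | none => simp [pvIsSub, h]  -- iterator exhausted before c
    | some rest =>
      have hsub : pvIsSub (c :: cs) txt = pvIsSub cs rest := by simp [pvIsSub, h]
      show pvIsSub (c :: cs) txt = true ↔ (c :: cs).length ≤ 1 + pvGreedy rest cs
      rw [hsub, ih rest]
      simp only [List.length_cons]
      omega

lemma pvGreedy_take (txt pat : List Char) (k : Nat) :
    pvGreedy txt (pat.take k) = min k (pvGreedy txt pat) := by
  induction txt generalizing pat k with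
  | nil => simp [pvGreedy]
  | cons t ts ih =>
    cases k with
    | zero => cases pat <;> simp [pvGreedy]
    | succ k' =>
      cases pat with
      | nil => simp [pvGreedy]
      | cons p ps =>
        by_cases h : t = p
        · simp [pvGreedy, h, ih ps k']; omega
        · simpa [pvGreedy, h] using ih (p :: ps) (k' + 1)

lemma pvFeasible (txt suf : List Char) (k : Nat) (hk : k ≤ suf.length) :
    pvIsSub (suf.take k) txt = true ↔ k ≤ pvGreedy txt suf := by
  rw [pvIsSub_iff, pvGreedy_take, List.length_take]
  omega

lemma pvBSearch_eq (txt suf : List Char) (lo hi : Nat)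
    (hlo : lo ≤ pvGreedy txt suf) (hhi : pvGreedy txt suf ≤ hi) (hlen : hi ≤ suf.length) :
    pvBSearch txt suf lo hi = pvGreedy txt suf := by
  by_cases h : lo < hi
  · rw [pvBSearch, if_pos h]
    have hmid1 : lo < (lo + hi + 1) / 2 := by omega
    have hmid2 : (lo + hi + 1) / 2 ≤ hi := by omega
    by_cases hf : pvIsSub (suf.take ((lo + hi + 1) / 2)) txt = true
    · have := (pvFeasible txt suf _ (by omega)).mp hf
      simp only [hf, if_true]
      exact pvBSearch_eq txt suf _ hi this hhi hlen
    · have : ¬ ((lo + hi + 1) / 2 ≤ pvGreedy txt suf) := fun hle =>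
        hf ((pvFeasible txt suf _ (by omega)).mpr hle)
      simp only [hf]
      exact pvBSearch_eq txt suf lo _ hlo (by omega) (by omega)
  · rw [pvBSearch, if_neg h]; omega
termination_by hi - lo
decreasing_by all_goals omega

-- ===== VERDICT (by name: the statement is the Claim_ definition above) =====
theorem get_matching_suffix_length_spec : Claim_equal_get_matching_suffix_length := by
  intro it cls _
  unfold Spec_get_matching_suffix_length get_matching_suffix_length get_matching_suffix_length_alt
  rw [pvBSearch_eq it.toList cls.toList 0 cls.toList.length (Nat.zero_le _)
        (pvGreedy_le _ _) (le_refl _)]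
  have := pvALoop_eq_greedy it.toList cls.toList 0 (Nat.zero_le _)
  simpa using this
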